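-- pv_equiv track=rewrite | github.com/jackthenewbie/MuxVId | getTarget.py | isNumIn
-- ===== SOURCE A (Python) =====
-- def isNumIn(num ,numList):
--     if numList==[]:
--         return False
--     for numI in numList:
--         if not numI.isdigit():
--             return False
--         if int(numI)==num:
--             return True
--     return False
-- ===== SOURCE B (Python) =====
-- def isNumIn(num, numList):
--     # First pass: collect the ints of the leading run of digit strings
--     # (stopping at the first non-digit, as A does); then a membership test.
--     prefix = []
--     for s in numList:
--         if not s.isdigit():
--             break
--         prefix.append(int(s))
--     return num in prefix
-- ===== Notes on version B (the rewrite author's own statement) =====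
-- stated objective: simpler
-- what changed: A's single fused loop with three exits is split into a prefix-extraction pass (ints of the leading digit-string run) followed by a plain membership test.
import Mathlib
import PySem

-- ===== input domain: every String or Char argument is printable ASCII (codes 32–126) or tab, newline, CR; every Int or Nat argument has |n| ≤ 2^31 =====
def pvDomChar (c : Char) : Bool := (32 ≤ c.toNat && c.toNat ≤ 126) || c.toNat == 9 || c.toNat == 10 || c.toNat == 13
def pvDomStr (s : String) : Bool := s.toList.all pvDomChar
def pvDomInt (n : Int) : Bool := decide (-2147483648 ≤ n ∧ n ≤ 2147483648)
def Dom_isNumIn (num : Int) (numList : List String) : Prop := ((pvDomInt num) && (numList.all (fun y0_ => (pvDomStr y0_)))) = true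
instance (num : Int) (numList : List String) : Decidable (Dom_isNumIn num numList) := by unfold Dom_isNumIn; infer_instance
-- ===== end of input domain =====

-- B splits A's single fused loop into a prefix-extraction pass (ints of the
-- leading digit-string run) followed by a plain membership test (objective: simpler).


-- ===== PORT A =====
-- the for-loop of A: non-digit → False; match → True; else continue
def isNumInGo (num : Int) : List String → Bool
  | [] => false
  | s :: rest =>
    if !(PySem.Str.strIsdigit s) then false
    -- int(numI): numI.isdigit() holds here, so int() cannot raise; getD 0 is unreachable
    else if (PySem.Int.ofStr? s).getD 0 = num then true
    else isNumInGo num rest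

def isNumIn (num : Int) (numList : List String) : Bool :=
  if numList = [] then false else isNumInGo num numList

-- ===== PORT B =====
-- first pass of B: the ints of the leading run of digit strings (loop with break)
def digitPrefixInts : List String → List Int
  | [] => []
  | s :: rest =>
    if PySem.Str.strIsdigit s then (PySem.Int.ofStr? s).getD 0 :: digitPrefixInts rest
    else []

def isNumIn_alt (num : Int) (numList : List String) : Bool :=
  (digitPrefixInts numList).contains num

-- ===== PRECONDITION & SPEC =====
def Spec_isNumIn (num : Int) (numList : List String) (out : Bool) : Prop := out = isNumIn_alt num numList
instance (num : Int) (numList : List String) (out : Bool) : Decidable (Spec_isNumIn num numList out) := by unfold Spec_isNumIn; infer_instance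

-- ===== CLAIM (what is proved, stated in full; the proofs are below) =====
def Claim_equal_isNumIn : Prop := ∀ (num : Int) (numList : List String), Dom_isNumIn num numList → Spec_isNumIn num numList (isNumIn num numList)

-- ===== LEMMAS AND PROOFS =====
theorem isNumInGo_eq (num : Int) (l : List String) :
    isNumInGo num l = (digitPrefixInts l).contains num := by
  induction l with
  | nil => simp [isNumInGo, digitPrefixInts]
  | cons s rest ih =>
    simp only [isNumInGo, digitPrefixInts]
    by_cases hd : PySem.Str.strIsdigit s
    all_goals simp only [PySem.Str.strIsdigit] at hd
    · by_cases hm : (PySem.Int.ofStr? s).getD 0 = num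
      · simp [hd, hm]
      · simp [hd, hm, ih, Ne.symm hm]
    · simp [hd]

-- ===== VERDICT (by name: the statement is the Claim_ definition above) =====
theorem isNumIn_spec : Claim_equal_isNumIn := by
  intro num numList _
  unfold Spec_isNumIn isNumIn isNumIn_alt
  rcases numList with _ | ⟨s, rest⟩
  · simp [digitPrefixInts]
  · simpa using isNumInGo_eq num (s :: rest)
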